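-- pv_equiv track=rewrite | github.com/symaeng98/Python-Crawling | BaekJoon/그리디 알고리즘/백준 1541번(잃어버린 괄호).py | Plus_calculation
-- ===== SOURCE A (Python) =====
-- def Plus_calculation(e): #덧셈 식을 계산해주는 함수
--     num = []
--     sum_num = 0
--     length = 0
--     for i in range(len(e)): #받은 배열의 길이만큼
--         if e[i] != '+': #+가 아닐 때는
--             num.append(e[i]) #num에 숫자를 append해주고
--         if e[i] == '+' or i == len(e)-1: #+이거나 배열이 끝나면,
--             length = len(num)
--             for j in range(length):#num의 자릿수만큼
--                 sum_num += int(num.pop())*(10**j) #num을 pop해주고 10씩 반복해서 자릿수를 맞추어준다.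
--     return sum_num
-- ===== SOURCE B (Python) =====
-- def Plus_calculation(e):
--     total = 0
--     current = 0
--     for c in e:
--         if c == '+':
--             total += current
--             current = 0
--         else:
--             current = current * 10 + int(c)
--     return total + current
-- ===== Notes on version B (the rewrite author's own statement) =====
-- stated objective: simpler
-- what changed: Replaces the collect-into-a-list-then-pop-with-10**j reconstruction by a single-pass Horner accumulation (total/current), dropping the num list and the inner power loop.
import Mathlib
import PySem

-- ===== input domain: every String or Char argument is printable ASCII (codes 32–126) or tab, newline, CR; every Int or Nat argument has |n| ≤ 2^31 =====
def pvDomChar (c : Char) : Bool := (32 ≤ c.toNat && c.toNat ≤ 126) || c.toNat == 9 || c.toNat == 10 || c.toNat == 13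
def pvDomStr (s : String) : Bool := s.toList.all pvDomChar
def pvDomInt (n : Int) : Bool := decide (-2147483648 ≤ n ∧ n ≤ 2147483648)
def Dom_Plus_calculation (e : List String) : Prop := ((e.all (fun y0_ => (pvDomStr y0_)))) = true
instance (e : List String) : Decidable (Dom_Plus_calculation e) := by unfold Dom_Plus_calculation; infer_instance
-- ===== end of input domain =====

-- B replaces A's collect-then-pop/10**j reconstruction by a single-pass Horner accumulation (simpler).


-- int(s); Pre_ excludes inputs where Python's int() raises, so the default is never claimed about
def pvIntOf (s : String) : Int := (PySem.Int.ofStr? s).getD 0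

-- ===== PORT A =====
-- inner loop: for j in range(len(num)): sum_num += int(num.pop())*(10**j)
-- (pops from the end; transcribed as structural recursion over num reversed)
def pvPopLoop (rev : List String) (j : Nat) (s : Int) : Int :=
  match rev with
  | [] => s
  | x :: xs => pvPopLoop xs (j + 1) (s + pvIntOf x * (10 : Int) ^ j)

-- outer loop over e; state: num (appended list) and sum_num; 'i == len(e)-1' is 'tail empty'
def pvALoop (rest : List String) (num : List String) (sumNum : Int) : Int :=
  match rest with
  | [] => sumNum
  | x :: xs =>
    let num1 := if x ≠ "+" then num ++ [x] else num
    if x = "+" ∨ xs = [] then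
      pvALoop xs [] (pvPopLoop num1.reverse 0 sumNum)
    else
      pvALoop xs num1 sumNum

def Plus_calculation (e : List String) : Int := pvALoop e [] 0

-- ===== PORT B =====
def Plus_calculation_alt (e : List String) : Int :=
  let p := e.foldl (fun (tc : Int × Int) c =>
    if c = "+" then (tc.1 + tc.2, 0) else (tc.1, tc.2 * 10 + pvIntOf c)) (0, 0)
  p.1 + p.2

-- ===== PRECONDITION & SPEC =====
-- Pre_ excludes exactly the inputs on which Python A raises ValueError: a non-'+' element int() cannot parse.
def Pre_Plus_calculation (e : List String) : Prop :=
  ∀ s ∈ e, s ≠ "+" → (PySem.Int.ofStr? s).isSome = true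
instance (e : List String) : Decidable (Pre_Plus_calculation e) := by
  unfold Pre_Plus_calculation; infer_instance
def pvWitness_Plus_calculation : List String := ["12", "+", "3", "+", "-4"]
def Spec_Plus_calculation (e : List String) (out : Int) : Prop := out = Plus_calculation_alt e
instance (e : List String) (out : Int) : Decidable (Spec_Plus_calculation e out) := by unfold Spec_Plus_calculation; infer_instance

-- ===== CLAIM (what is proved, stated in full; the proofs are below) =====
def Claim_equal_Plus_calculation : Prop := ∀ (e : List String), Dom_Plus_calculation e → Pre_Plus_calculation e → Spec_Plus_calculation e (Plus_calculation e)

-- ===== LEMMAS AND PROOFS =====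

-- value of the collected digit list, most-significant element first (B's Horner accumulator)
def pvVal (num : List String) : Int := num.foldl (fun c d => c * 10 + pvIntOf d) 0

theorem pvVal_append (num : List String) (d : String) :
    pvVal (num ++ [d]) = pvVal num * 10 + pvIntOf d := by
  simp [pvVal]

theorem pvPopLoop_eq (num : List String) : ∀ (j : Nat) (s : Int),
    pvPopLoop num.reverse j s = s + pvVal num * (10 : Int) ^ j := by
  induction num using List.reverseRecOn with
  | nil => intro j s; simp [pvPopLoop, pvVal]
  | append_singleton ys d ih =>
    intro j s
    simp only [List.reverse_append, List.reverse_singleton, List.singleton_append,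
      pvPopLoop, pvVal_append]
    rw [ih]
    ring

-- run of B's fold from state (t, c) over rest, plus final t+c
def pvBRun (rest : List String) (t c : Int) : Int :=
  let p := rest.foldl (fun (tc : Int × Int) x =>
    if x = "+" then (tc.1 + tc.2, 0) else (tc.1, tc.2 * 10 + pvIntOf x)) (t, c)
  p.1 + p.2

theorem pvALoop_eq_bRun : ∀ (rest num : List String) (s : Int), rest ≠ [] →
    pvALoop rest num s = pvBRun rest s (pvVal num) := by
  intro rest
  induction rest with
  | nil => intro _ _ h; exact absurd rfl h
  | cons x xs ih =>
    intro num s _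
    by_cases hx : x = "+"
    · subst hx
      simp only [pvALoop, pvBRun, List.foldl_cons, ne_eq, not_true_eq_false,
        ite_false, true_or, if_true]
      have h0 := pvPopLoop_eq num 0 s
      simp only [pow_zero, mul_one] at h0
      rcases List.eq_nil_or_concat' xs with hxs | _
      · subst hxs
        simp [pvALoop, h0]
      · have hne : xs ≠ [] := by rintro rfl; simp_all
        rw [h0, ih [] (s + pvVal num) hne]
        simp [pvBRun, pvVal]
    · simp only [pvALoop, pvBRun, List.foldl_cons, ne_eq, hx, not_false_iff,
        ite_true, false_or]
      rcases List.eq_nil_or_concat' xs with hxs | _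
      · subst hxs
        have h0 := pvPopLoop_eq (num ++ [x]) 0 s
        simp only [pow_zero, mul_one, List.reverse_append, List.reverse_singleton,
          List.singleton_append, pvVal_append] at h0
        simp [pvALoop, h0]
      · have hne : xs ≠ [] := by rintro rfl; simp_all
        rw [if_neg hne, ih (num ++ [x]) s hne]
        simp [pvBRun, pvVal_append]

-- ===== VERDICT (by name: the statement is the Claim_ definition above) =====
theorem Plus_calculation_spec : Claim_equal_Plus_calculation := by
  intro e _ _
  unfold Spec_Plus_calculation Plus_calculation Plus_calculation_alt
  rcases List.eq_nil_or_concat' e with he | _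
  · subst he; simp [pvALoop]
  · have hne : e ≠ [] := by rintro rfl; simp_all
    rw [pvALoop_eq_bRun e [] 0 hne]
    simp [pvBRun, pvVal]
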